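-- pv_equiv track=rewrite | github.com/SanchithVel/Word-Patterns | text_processor.py | alternatingCapitalization
-- ===== SOURCE A (Python) =====
-- def alternatingCapitalization(text):
--     """
--     Alternates the capitalization of characters in the given text, ignoring spaces.
--
--     Parameters:
--         text (str): The string to be modified with alternating capitalization -> text.
--
--     Returns:
--         str: The string with alternating capitalization -> newAlternatingWord.
--     """
--     newAlternatingWord = ""
--     count = 0  # Counter to track the position for alternating case, ignoring spaces
--     for x in range(len(text)):
--         if text[x] == " ":  # If it's a space, add it unchanged
--             newAlternatingWord += " "
--         else:
--             if count % 2 == 0: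
--                 newAlternatingWord += text[x].upper()
--             else:
--                 newAlternatingWord += text[x].lower()
--             count += 1  # Only increment count for non-space characters
--
--     return newAlternatingWord
-- ===== SOURCE B (Python) =====
-- def alternatingCapitalization(text):
--     # Two-pass filter-then-merge: transform the non-space chars by their
--     # filtered index, then weave them back between the original spaces.
--     chars = [c for c in text if c != " "]
--     transformed = [c.upper() if i % 2 == 0 else c.lower()
--                    for i, c in enumerate(chars)]
--     it = iter(transformed)
--     return "".join(" " if c == " " else next(it) for c in text)
-- ===== Notes on version B (the rewrite author's own statement) =====
-- stated objective: alternative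
-- what changed: Replaces the single counter-toggled pass with a filter-then-merge decomposition: first build the list of non-space characters and case-transform each by its filtered index, then weave them back into the original string, emitting spaces verbatim.
import Mathlib
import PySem

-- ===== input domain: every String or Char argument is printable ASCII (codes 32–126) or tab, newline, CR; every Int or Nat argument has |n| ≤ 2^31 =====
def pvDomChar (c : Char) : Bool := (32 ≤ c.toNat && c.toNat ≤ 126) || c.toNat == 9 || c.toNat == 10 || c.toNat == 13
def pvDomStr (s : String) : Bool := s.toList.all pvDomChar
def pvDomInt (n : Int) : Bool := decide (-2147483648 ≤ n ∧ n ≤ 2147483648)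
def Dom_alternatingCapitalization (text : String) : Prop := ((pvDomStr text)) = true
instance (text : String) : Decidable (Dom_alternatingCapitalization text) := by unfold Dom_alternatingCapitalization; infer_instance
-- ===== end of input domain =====

-- B replaces A's single counter-toggled pass with a filter-then-merge decomposition (alternative, same cost).


-- ===== PORT A =====
-- A's loop over the characters, carrying the non-space counter `count`.
def altCapA_go : List Char → Nat → List Char
  | [], _ => []
  | c :: cs, count =>
    if c = ' ' then ' ' :: altCapA_go cs count
    else (if count % 2 == 0 then PySem.Chars.upper [c] else PySem.Chars.lower [c])
           ++ altCapA_go cs (count + 1)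

def alternatingCapitalization (text : String) : String :=
  String.mk (altCapA_go text.toList 0)

-- ===== PORT B =====
-- pass 1a: the non-space characters
def altCapB_filter (l : List Char) : List Char := l.filter (fun c => c ≠ ' ')
-- pass 1b: case-transform each by its index in the filtered list (`transformed`)
def altCapB_transform (l : List Char) : List (List Char) :=
  (PySem.List.enumerate l).map
    (fun p => if p.1 % 2 == 0 then PySem.Chars.upper [p.2] else PySem.Chars.lower [p.2])
-- pass 2: weave: a space stays, any other char consumes the next transformed piece
def altCapB_merge : List Char → List (List Char) → List Char
  | [], _ => []
  | c :: cs, ts =>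
    if c = ' ' then ' ' :: altCapB_merge cs ts
    else match ts with
      | [] => []            -- iterator exhausted; unreachable (one piece per non-space char)
      | t :: ts' => t ++ altCapB_merge cs ts'

def alternatingCapitalization_alt (text : String) : String :=
  String.mk (altCapB_merge text.toList (altCapB_transform (altCapB_filter text.toList)))

-- ===== PRECONDITION & SPEC =====
def Spec_alternatingCapitalization (text : String) (out : String) : Prop := out = alternatingCapitalization_alt text
instance (text : String) (out : String) : Decidable (Spec_alternatingCapitalization text out) := by unfold Spec_alternatingCapitalization; infer_instance

-- ===== CLAIM (what is proved, stated in full; the proofs are below) =====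
def Claim_equal_alternatingCapitalization : Prop := ∀ (text : String), Dom_alternatingCapitalization text → Spec_alternatingCapitalization text (alternatingCapitalization text)

-- ===== LEMMAS AND PROOFS =====

-- transform of a filtered list, with the enumeration starting at n, unfolds on a space / non-space head
lemma altCapB_transform_filter_cons_space (cs : List Char) (n : Int) :
    (PySem.List.enumerate (altCapB_filter (' ' :: cs)) n) =
    (PySem.List.enumerate (altCapB_filter cs) n) := by
  simp [altCapB_filter]

lemma enumerate_map_cons (c : Char) (cs : List Char) (n : Int) :
    (PySem.List.enumerate (c :: cs) n).map
      (fun p : Int × Char => if p.1 % 2 == 0 then PySem.Chars.upper [p.2] else PySem.Chars.lower [p.2]) =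
    (if n % 2 == 0 then PySem.Chars.upper [c] else PySem.Chars.lower [c]) ::
      (PySem.List.enumerate cs (n + 1)).map
        (fun p : Int × Char => if p.1 % 2 == 0 then PySem.Chars.upper [p.2] else PySem.Chars.lower [p.2]) := by
  simp [PySem.List.enumerate_cons]

-- the main invariant: A's loop with counter n equals B's merge against the pieces enumerated from n
lemma altCap_key (l : List Char) (n : Nat) :
    altCapA_go l n =
    altCapB_merge l ((PySem.List.enumerate (altCapB_filter l) (n : Int)).map
      (fun p : Int × Char => if p.1 % 2 == 0 then PySem.Chars.upper [p.2] else PySem.Chars.lower [p.2])) := by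
  induction l generalizing n with
  | nil => simp [altCapA_go, altCapB_merge]
  | cons c cs ih =>
    by_cases hc : c = ' '
    · subst hc
      rw [altCapB_transform_filter_cons_space]
      simp [altCapA_go, altCapB_merge, ih n]
    · have hf : altCapB_filter (c :: cs) = c :: altCapB_filter cs := by
        simp [altCapB_filter, hc]
      rw [hf, enumerate_map_cons]
      have hmod : ((n : Int) % 2 == 0) = (n % 2 == 0) := by
        rcases Nat.mod_two_eq_zero_or_one n with h | h
        · have h2 : (n : Int) % 2 = 0 := by omega
          simp [h, h2]
        · have h2 : (n : Int) % 2 = 1 := by omega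
          simp [h, h2]
      have hcast : ((n : Int) + 1) = ((n + 1 : Nat) : Int) := by push_cast; ring
      simp only [altCapA_go, altCapB_merge, hc, hmod, hcast, ih (n + 1)]
      simp

-- ===== VERDICT (by name: the statement is the Claim_ definition above) =====
theorem alternatingCapitalization_spec : Claim_equal_alternatingCapitalization := by
  intro text _
  unfold Spec_alternatingCapitalization alternatingCapitalization alternatingCapitalization_alt
  rw [altCap_key]
  rfl
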